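-- pv_equiv track=rewrite | github.com/pypi-data/pypi-mirror-403 | packages/snmpbox/snmpbox-0.1.0-py3-none-any.whl/snmp_manager/adaptive/self_learning.py | _are_vendors_related
-- ===== SOURCE A (Python) =====
-- def _are_vendors_related(vendor1: str, vendor2: str) -> bool:
--     """Check if two vendors are related."""
--     # Related vendor groups
--     related_groups = [
--         ["huawei", "h3c", "hpe"],
--         ["zte", "zte corporation"],
--         ["cisco", "cisco systems"],
--         ["vsol", "volution"],
--     ]
--
--     for group in related_groups:
--         if vendor1 in group and vendor2 in group:
--             return True
--
--     return False
-- ===== SOURCE B (Python) =====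
-- # B: precompute a vendor -> group-index dict once; the check becomes two lookups
-- # with a same-group comparison (None-guarded), instead of scanning each group.
-- _RELATED_GROUPS = [
--     ["huawei", "h3c", "hpe"],
--     ["zte", "zte corporation"],
--     ["cisco", "cisco systems"],
--     ["vsol", "volution"],
-- ]
-- _VENDOR_GROUP = {v: i for i, g in enumerate(_RELATED_GROUPS) for v in g}
--
--
-- def _are_vendors_related(vendor1: str, vendor2: str) -> bool:
--     g = _VENDOR_GROUP.get(vendor1)
--     return g is not None and _VENDOR_GROUP.get(vendor2) == g
-- ===== Notes on version B (the rewrite author's own statement) =====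
-- stated objective: idiomatic
-- what changed: Replaced the per-call scan over the four group lists with a vendor-to-group-index dict built once at module load; the check is two lookups compared under a None guard.
import Mathlib
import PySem

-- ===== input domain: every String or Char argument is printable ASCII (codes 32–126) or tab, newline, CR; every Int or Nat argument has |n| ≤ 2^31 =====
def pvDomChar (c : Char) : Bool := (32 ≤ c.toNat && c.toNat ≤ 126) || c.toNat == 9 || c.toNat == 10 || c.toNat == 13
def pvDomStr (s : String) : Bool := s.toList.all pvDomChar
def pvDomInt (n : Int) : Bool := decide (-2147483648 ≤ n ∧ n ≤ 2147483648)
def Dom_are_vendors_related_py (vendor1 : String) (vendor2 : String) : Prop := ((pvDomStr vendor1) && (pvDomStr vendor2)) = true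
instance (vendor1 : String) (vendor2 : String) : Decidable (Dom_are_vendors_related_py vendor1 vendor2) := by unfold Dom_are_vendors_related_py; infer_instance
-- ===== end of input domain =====

-- B replaces A's per-call scan over the group lists by a vendor → group-index dict
-- built once, with the check done as two lookups compared under a None guard (idiomatic).

-- ===== PORT A =====
def pvRelatedGroupsA : List (List String) :=
  [["huawei", "h3c", "hpe"],
   ["zte", "zte corporation"],
   ["cisco", "cisco systems"],
   ["vsol", "volution"]]

-- the 'for group in related_groups: if vendor1 in group and vendor2 in group: return True'
def pvLoopA : List (List String) → String → String → Bool
  | [], _, _ => false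
  | g :: rest, v1, v2 =>
      if g.contains v1 && g.contains v2 then true else pvLoopA rest v1 v2

def are_vendors_related_py (vendor1 : String) (vendor2 : String) : Bool :=
  pvLoopA pvRelatedGroupsA vendor1 vendor2

-- ===== PORT B =====
def pvRelatedGroupsB : List (List String) :=
  [["huawei", "h3c", "hpe"],
   ["zte", "zte corporation"],
   ["cisco", "cisco systems"],
   ["vsol", "volution"]]

-- the dict comprehension {v: i for i, g in enumerate(_RELATED_GROUPS) for v in g}
def pvVendorGroup : PySem.Dict String Int :=
  (PySem.List.enumerate pvRelatedGroupsB).foldl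
    (fun d p => p.2.foldl (fun d v => d.insert v p.1) d) PySem.Dict.empty

-- g = dict.get(vendor1); return g is not None and dict.get(vendor2) == g
def are_vendors_related_py_alt (vendor1 : String) (vendor2 : String) : Bool :=
  match pvVendorGroup.get? vendor1 with
  | none => false
  | some g => pvVendorGroup.get? vendor2 == some g

-- ===== PRECONDITION & SPEC =====
def Spec_are_vendors_related_py (vendor1 : String) (vendor2 : String) (out : Bool) : Prop := out = are_vendors_related_py_alt vendor1 vendor2
instance (vendor1 : String) (vendor2 : String) (out : Bool) : Decidable (Spec_are_vendors_related_py vendor1 vendor2 out) := by unfold Spec_are_vendors_related_py; infer_instance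

-- ===== CLAIM (what is proved, stated in full; the proofs are below) =====
def Claim_equal_are_vendors_related_py : Prop := ∀ (vendor1 : String) (vendor2 : String), Dom_are_vendors_related_py vendor1 vendor2 → Spec_are_vendors_related_py vendor1 vendor2 (are_vendors_related_py vendor1 vendor2)

-- ===== LEMMAS AND PROOFS =====

-- B's dict lookup, written out as the first-match-wins chain over the inserted keys
set_option maxHeartbeats 1000000 in
lemma get_chain (v : String) : pvVendorGroup.get? v =
    if v = "volution" then some 3 else if v = "vsol" then some 3
    else if v = "cisco systems" then some 2 else if v = "cisco" then some 2
    else if v = "zte corporation" then some 1 else if v = "zte" then some 1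
    else if v = "hpe" then some 0 else if v = "h3c" then some 0
    else if v = "huawei" then some 0 else none := by
  simp only [pvVendorGroup, pvRelatedGroupsB, PySem.List.enumerate_cons, PySem.List.enumerate_nil,
    List.foldl_cons, List.foldl_nil, PySem.Dict.get?_insert, PySem.Dict.get?_empty]
  norm_num

set_option maxHeartbeats 1000000 in
lemma case_huawei (v2 : String) :
    are_vendors_related_py "huawei" v2 = are_vendors_related_py_alt "huawei" v2 := by
  unfold are_vendors_related_py are_vendors_related_py_alt
  simp only [pvLoopA, pvRelatedGroupsA, List.contains_cons, List.contains_nil]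
  rw [show pvVendorGroup.get? "huawei" = some 0 from by decide]
  simp
  rw [get_chain v2]
  split_ifs <;> simp_all

set_option maxHeartbeats 1000000 in
lemma case_h3c (v2 : String) :
    are_vendors_related_py "h3c" v2 = are_vendors_related_py_alt "h3c" v2 := by
  unfold are_vendors_related_py are_vendors_related_py_alt
  simp only [pvLoopA, pvRelatedGroupsA, List.contains_cons, List.contains_nil]
  rw [show pvVendorGroup.get? "h3c" = some 0 from by decide]
  simp
  rw [get_chain v2]
  split_ifs <;> simp_all

set_option maxHeartbeats 1000000 in
lemma case_hpe (v2 : String) :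
    are_vendors_related_py "hpe" v2 = are_vendors_related_py_alt "hpe" v2 := by
  unfold are_vendors_related_py are_vendors_related_py_alt
  simp only [pvLoopA, pvRelatedGroupsA, List.contains_cons, List.contains_nil]
  rw [show pvVendorGroup.get? "hpe" = some 0 from by decide]
  simp
  rw [get_chain v2]
  split_ifs <;> simp_all

set_option maxHeartbeats 1000000 in
lemma case_zte (v2 : String) :
    are_vendors_related_py "zte" v2 = are_vendors_related_py_alt "zte" v2 := by
  unfold are_vendors_related_py are_vendors_related_py_alt
  simp only [pvLoopA, pvRelatedGroupsA, List.contains_cons, List.contains_nil]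
  rw [show pvVendorGroup.get? "zte" = some 1 from by decide]
  simp
  rw [get_chain v2]
  split_ifs <;> simp_all

set_option maxHeartbeats 1000000 in
lemma case_zte_corporation (v2 : String) :
    are_vendors_related_py "zte corporation" v2 = are_vendors_related_py_alt "zte corporation" v2 := by
  unfold are_vendors_related_py are_vendors_related_py_alt
  simp only [pvLoopA, pvRelatedGroupsA, List.contains_cons, List.contains_nil]
  rw [show pvVendorGroup.get? "zte corporation" = some 1 from by decide]
  simp
  rw [get_chain v2]
  split_ifs <;> simp_all

set_option maxHeartbeats 1000000 in
lemma case_cisco (v2 : String) :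
    are_vendors_related_py "cisco" v2 = are_vendors_related_py_alt "cisco" v2 := by
  unfold are_vendors_related_py are_vendors_related_py_alt
  simp only [pvLoopA, pvRelatedGroupsA, List.contains_cons, List.contains_nil]
  rw [show pvVendorGroup.get? "cisco" = some 2 from by decide]
  simp
  rw [get_chain v2]
  split_ifs <;> simp_all

set_option maxHeartbeats 1000000 in
lemma case_cisco_systems (v2 : String) :
    are_vendors_related_py "cisco systems" v2 = are_vendors_related_py_alt "cisco systems" v2 := by
  unfold are_vendors_related_py are_vendors_related_py_alt
  simp only [pvLoopA, pvRelatedGroupsA, List.contains_cons, List.contains_nil]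
  rw [show pvVendorGroup.get? "cisco systems" = some 2 from by decide]
  simp
  rw [get_chain v2]
  split_ifs <;> simp_all

set_option maxHeartbeats 1000000 in
lemma case_vsol (v2 : String) :
    are_vendors_related_py "vsol" v2 = are_vendors_related_py_alt "vsol" v2 := by
  unfold are_vendors_related_py are_vendors_related_py_alt
  simp only [pvLoopA, pvRelatedGroupsA, List.contains_cons, List.contains_nil]
  rw [show pvVendorGroup.get? "vsol" = some 3 from by decide]
  simp
  rw [get_chain v2]
  split_ifs <;> simp_all

set_option maxHeartbeats 1000000 in
lemma case_volution (v2 : String) :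
    are_vendors_related_py "volution" v2 = are_vendors_related_py_alt "volution" v2 := by
  unfold are_vendors_related_py are_vendors_related_py_alt
  simp only [pvLoopA, pvRelatedGroupsA, List.contains_cons, List.contains_nil]
  rw [show pvVendorGroup.get? "volution" = some 3 from by decide]
  simp
  rw [get_chain v2]
  split_ifs <;> simp_all

set_option maxHeartbeats 1000000 in
lemma case_none (v1 v2 : String)
    (h0 : v1 ≠ "huawei") (h1 : v1 ≠ "h3c") (h2 : v1 ≠ "hpe") (h3 : v1 ≠ "zte") (h4 : v1 ≠ "zte corporation") (h5 : v1 ≠ "cisco") (h6 : v1 ≠ "cisco systems") (h7 : v1 ≠ "vsol") (h8 : v1 ≠ "volution") :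
    are_vendors_related_py v1 v2 = are_vendors_related_py_alt v1 v2 := by
  unfold are_vendors_related_py are_vendors_related_py_alt
  rw [get_chain v1]
  simp_all [pvLoopA, pvRelatedGroupsA]

-- ===== VERDICT (by name: the statement is the Claim_ definition above) =====
theorem are_vendors_related_py_spec : Claim_equal_are_vendors_related_py := by
  intro vendor1 vendor2 _
  unfold Spec_are_vendors_related_py
  by_cases h0 : vendor1 = "huawei"
  · subst h0; exact case_huawei vendor2
  by_cases h1 : vendor1 = "h3c"
  · subst h1; exact case_h3c vendor2
  by_cases h2 : vendor1 = "hpe"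
  · subst h2; exact case_hpe vendor2
  by_cases h3 : vendor1 = "zte"
  · subst h3; exact case_zte vendor2
  by_cases h4 : vendor1 = "zte corporation"
  · subst h4; exact case_zte_corporation vendor2
  by_cases h5 : vendor1 = "cisco"
  · subst h5; exact case_cisco vendor2
  by_cases h6 : vendor1 = "cisco systems"
  · subst h6; exact case_cisco_systems vendor2
  by_cases h7 : vendor1 = "vsol"
  · subst h7; exact case_vsol vendor2
  by_cases h8 : vendor1 = "volution"
  · subst h8; exact case_volution vendor2
  exact case_none vendor1 vendor2 h0 h1 h2 h3 h4 h5 h6 h7 h8
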